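-- pv_equiv track=rewrite | github.com/dz114879/fox-dayi-bot | cogs/wiki_search.py | order_section_keys
-- ===== SOURCE A (Python) =====
-- from collections import OrderedDict
--
-- def order_section_keys(grouped: OrderedDict[str, list[dict]]) -> list[str]:
--     keys = list(grouped.keys())
--     ordered: list[str] = []
--
--     if "faq/recent" in grouped:
--         ordered.append("faq/recent")
--
--     for key in keys:
--         if key == "faq" or key.startswith("faq/"):
--             if key not in ordered:
--                 ordered.append(key)
--
--     for key in keys:
--         if key not in ordered:
--             ordered.append(key)
--
--     return ordered
-- ===== SOURCE B (Python) =====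
-- def order_section_keys(grouped):
--     b0, b1, b2 = [], [], []
--     for key in grouped.keys():
--         if key == "faq/recent":
--             b0.append(key)
--         elif key == "faq" or key.startswith("faq/"):
--             b1.append(key)
--         else:
--             b2.append(key)
--     return b0 + b1 + b2
-- ===== Notes on version B (the rewrite author's own statement) =====
-- stated objective: faster
-- what changed: Replaces A's three passes with 'key not in ordered' list-membership dedup checks by one pass that drops each key into one of three priority buckets and concatenates them; Pre_ only excludes association lists with duplicate keys, which represent no dict input of A.
import Mathlib
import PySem

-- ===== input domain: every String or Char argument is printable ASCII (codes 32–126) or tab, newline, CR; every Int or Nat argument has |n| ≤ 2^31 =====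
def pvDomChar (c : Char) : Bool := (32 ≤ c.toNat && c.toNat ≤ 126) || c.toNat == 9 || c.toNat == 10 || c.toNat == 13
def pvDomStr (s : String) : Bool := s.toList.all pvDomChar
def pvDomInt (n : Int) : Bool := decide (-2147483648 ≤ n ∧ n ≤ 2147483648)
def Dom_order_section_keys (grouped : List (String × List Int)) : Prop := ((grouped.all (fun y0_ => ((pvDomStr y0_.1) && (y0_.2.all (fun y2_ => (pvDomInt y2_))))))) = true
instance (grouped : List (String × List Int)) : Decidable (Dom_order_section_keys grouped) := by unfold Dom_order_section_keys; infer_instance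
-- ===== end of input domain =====

-- B replaces A's three passes with membership-dedup by a single pass into three priority buckets; faster on large inputs.


-- ===== PORT A =====
def order_section_keys (grouped : List (String × List Int)) : List String :=
  let keys := grouped.map Prod.fst
  let ordered : List String :=
    if keys.contains "faq/recent" then ["faq/recent"] else []
  let ordered :=
    keys.foldl (fun acc key =>
      if key == "faq" || PySem.Str.startswith key "faq/" then
        (if acc.contains key then acc else acc ++ [key])
      else acc) ordered
  let ordered :=
    keys.foldl (fun acc key =>
      if acc.contains key then acc else acc ++ [key]) ordered
  ordered

-- ===== PORT B =====
def order_section_keys_alt (grouped : List (String × List Int)) : List String :=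
  let b :=
    (grouped.map Prod.fst).foldl (fun (b : List String × List String × List String) key =>
      if key == "faq/recent" then (b.1 ++ [key], b.2.1, b.2.2)
      else if key == "faq" || PySem.Str.startswith key "faq/" then (b.1, b.2.1 ++ [key], b.2.2)
      else (b.1, b.2.1, b.2.2 ++ [key])) ([], [], [])
  b.1 ++ b.2.1 ++ b.2.2

-- ===== PRECONDITION & SPEC =====
-- Pre_ excludes association lists with duplicate keys: they do not represent any OrderedDict
-- input of A (a Python dict has unique keys), so A's behaviour on them is not defined.
def Pre_order_section_keys (grouped : List (String × List Int)) : Prop :=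
  (grouped.map Prod.fst).Nodup
instance (grouped : List (String × List Int)) : Decidable (Pre_order_section_keys grouped) := by unfold Pre_order_section_keys; infer_instance
def pvWitness_order_section_keys : (List (String × List Int)) :=
  [("faq/recent", [1]), ("intro", []), ("faq", [2]), ("faq/old", [3])]

def Spec_order_section_keys (grouped : List (String × List Int)) (out : List String) : Prop := out = order_section_keys_alt grouped
instance (grouped : List (String × List Int)) (out : List String) : Decidable (Spec_order_section_keys grouped out) := by unfold Spec_order_section_keys; infer_instance

-- ===== CLAIM (what is proved, stated in full; the proofs are below) =====
def Claim_equal_order_section_keys : Prop := ∀ (grouped : List (String × List Int)), Dom_order_section_keys grouped → Pre_order_section_keys grouped → Spec_order_section_keys grouped (order_section_keys grouped)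

-- ===== LEMMAS AND PROOFS =====

-- abbreviation for the faq-like test, proofs only
def pvIsFaq (k : String) : Bool := k == "faq" || PySem.Str.startswith k "faq/"

-- A's dedup pass (with outer condition) over a nodup list is acc ++ filter
lemma foldl_dedup_cond (cond : String → Bool) :
    ∀ (ks acc : List String), ks.Nodup →
      ks.foldl (fun acc key =>
        if cond key then (if acc.contains key then acc else acc ++ [key]) else acc) acc
      = acc ++ ks.filter (fun k => cond k && !acc.contains k) := by
  intro ks
  induction ks with
  | nil => intro acc _; simp
  | cons k ks ih =>
    intro acc hnd
    rw [List.nodup_cons] at hnd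
    obtain ⟨hk, hnd⟩ := hnd
    rw [List.foldl_cons, List.filter_cons]
    by_cases hc : cond k = true
    · by_cases hm : acc.contains k = true
      · have hm' : k ∈ acc := by simpa using hm
        rw [if_pos hc, if_pos hm, ih acc hnd]
        simp [hc, hm']
      · have hmf : acc.contains k = false := by simpa using hm
        rw [if_pos hc, if_neg hm, ih (acc ++ [k]) hnd]
        have key : List.filter (fun a => cond a && !(acc ++ [k]).contains a) ks
            = List.filter (fun a => cond a && !acc.contains a) ks := by
          apply List.filter_congr
          intro a ha
          have hne : a ≠ k := fun h => hk (h ▸ ha)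
          simp [hne]
        rw [key]
        have hm' : k ∉ acc := by simpa using hmf
        simp [hc, hm']
    · have hcf : cond k = false := by simpa using hc
      rw [if_neg hc, ih acc hnd]
      simp [hcf]

-- A's final pass (no outer condition)
lemma foldl_dedup :
    ∀ (ks acc : List String), ks.Nodup →
      ks.foldl (fun acc key => if acc.contains key then acc else acc ++ [key]) acc
      = acc ++ ks.filter (fun k => !acc.contains k) := by
  intro ks acc hnd
  have := foldl_dedup_cond (fun _ => true) ks acc hnd
  simpa using this

-- B's bucket fold
lemma foldl_buckets :
    ∀ (ks : List String) (b0 b1 b2 : List String),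
      ks.foldl (fun (b : List String × List String × List String) key =>
        if key == "faq/recent" then (b.1 ++ [key], b.2.1, b.2.2)
        else if key == "faq" || PySem.Str.startswith key "faq/" then (b.1, b.2.1 ++ [key], b.2.2)
        else (b.1, b.2.1, b.2.2 ++ [key])) (b0, b1, b2)
      = (b0 ++ ks.filter (fun k => k == "faq/recent"),
         b1 ++ ks.filter (fun k => !(k == "faq/recent") && pvIsFaq k),
         b2 ++ ks.filter (fun k => !(k == "faq/recent") && !pvIsFaq k)) := by
  intro ks
  induction ks with
  | nil => intro b0 b1 b2; simp
  | cons k ks ih =>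
    intro b0 b1 b2
    rw [List.foldl_cons, List.filter_cons, List.filter_cons, List.filter_cons]
    by_cases h0 : (k == "faq/recent") = true
    · have hf : pvIsFaq k = true := by
        have hke : k = "faq/recent" := by simpa using h0
        subst hke; decide
      rw [if_pos h0, ih]
      simp [h0, hf]
    · have h0' : (k == "faq/recent") = false := Bool.eq_false_iff.mpr h0
      by_cases h1 : (k == "faq" || PySem.Str.startswith k "faq/") = true
      · rw [if_neg h0, if_pos h1, ih]
        simp [h0', pvIsFaq]
        intro hne
        rcases (by simpa [PySem.Str.startswith] using h1 : k = "faq" ∨ PySem.Chars.startswith k.toList ['f', 'a', 'q', '/'] = true) with h' | h'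
        · exact absurd h' hne
        · exact h' 
      · have h1' : (k == "faq" || PySem.Str.startswith k "faq/") = false := Bool.eq_false_iff.mpr h1
        rw [if_neg h0, if_neg h1, ih]
        simp [h0', pvIsFaq]
        simpa [PySem.Str.startswith] using h1' 

-- filter of the singleton key on a nodup list containing it
lemma filter_recent_of_mem :
    ∀ (ks : List String), ks.Nodup → "faq/recent" ∈ ks →
      ks.filter (fun k => k == "faq/recent") = ["faq/recent"] := by
  intro ks
  induction ks with
  | nil => intro _ h; simp at h
  | cons k ks ih =>
    intro hnd hm
    rw [List.nodup_cons] at hnd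
    obtain ⟨hk, hnd⟩ := hnd
    by_cases he : k = "faq/recent"
    · subst he
      have : ks.filter (fun k => k == "faq/recent") = [] := by
        apply List.filter_eq_nil_iff.mpr
        intro a ha
        simp only [beq_iff_eq]
        intro h; exact hk (h ▸ ha)
      simp [this]
    · have hm' : "faq/recent" ∈ ks := by
        rcases List.mem_cons.mp hm with h | h
        · exact absurd h.symm he
        · exact h
      simp [he, ih hnd hm']

lemma filter_recent_of_not_mem :
    ∀ (ks : List String), "faq/recent" ∉ ks →
      ks.filter (fun k => k == "faq/recent") = [] := by
  intro ks hm
  apply List.filter_eq_nil_iff.mpr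
  intro a ha
  simp only [beq_iff_eq]
  intro h; exact hm (h ▸ ha)

lemma isFaq_recent : pvIsFaq "faq/recent" = true := by decide

-- ===== VERDICT (by name: the statement is the Claim_ definition above) =====
theorem order_section_keys_spec : Claim_equal_order_section_keys := by
  intro grouped _ hpre
  unfold Spec_order_section_keys order_section_keys order_section_keys_alt
  set ks := grouped.map Prod.fst with hks
  have hnd : ks.Nodup := hpre
  simp only
  rw [foldl_buckets ks [] [] []]
  simp only [List.nil_append]
  by_cases hmem : "faq/recent" ∈ ks
  · have hc : ks.contains "faq/recent" = true := by simpa using hmem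
    rw [if_pos hc]
    rw [foldl_dedup_cond _ ks _ hnd]
    have e1 : ks.filter (fun k => (k == "faq" || PySem.Str.startswith k "faq/") && !(["faq/recent"] : List String).contains k)
        = ks.filter (fun k => !(k == "faq/recent") && pvIsFaq k) := by
      apply List.filter_congr
      intro a _
      unfold pvIsFaq
      by_cases h : a = "faq/recent" <;> simp [h, Bool.and_comm]
    rw [e1]
    rw [foldl_dedup _ _ hnd]
    have e2 : ks.filter (fun k => !((["faq/recent"] ++ ks.filter (fun k => !(k == "faq/recent") && pvIsFaq k)).contains k))
        = ks.filter (fun k => !(k == "faq/recent") && !pvIsFaq k) := by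
      apply List.filter_congr
      intro a ha
      by_cases h : a = "faq/recent"
      · simp [h, isFaq_recent]
      · by_cases hf : pvIsFaq a = true <;> simp [h, hf, ha]
    rw [e2]
    rw [filter_recent_of_mem ks hnd hmem]
  · have hc : ks.contains "faq/recent" = false := by simpa using hmem
    rw [if_neg (by simpa using hmem)]
    rw [foldl_dedup_cond _ ks _ hnd]
    have hne : ∀ a ∈ ks, a ≠ "faq/recent" := fun a ha h => hmem (h ▸ ha)
    have e1 : ks.filter (fun k => (k == "faq" || PySem.Str.startswith k "faq/") && !([] : List String).contains k)
        = ks.filter (fun k => !(k == "faq/recent") && pvIsFaq k) := by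
      apply List.filter_congr
      intro a ha
      unfold pvIsFaq
      simp [hne a ha]
    rw [e1]
    rw [foldl_dedup _ _ hnd]
    have e2 : ks.filter (fun k => !((([] : List String) ++ ks.filter (fun k => !(k == "faq/recent") && pvIsFaq k)).contains k))
        = ks.filter (fun k => !(k == "faq/recent") && !pvIsFaq k) := by
      apply List.filter_congr
      intro a ha
      by_cases hf : pvIsFaq a = true <;> simp [hne a ha, hf, ha]
    rw [e2]
    rw [filter_recent_of_not_mem ks hmem]
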